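-- pv_equiv track=rewrite | github.com/pypi-data/pypi-mirror-402 | packages/snid-sage/snid_sage-1.1.1.tar.gz/snid_sage-1.1.1/snid_sage/tools/wiserep_web_table_export.py | _choose_ra_dec_columns
-- ===== SOURCE A (Python) =====
-- from typing import Dict, Iterable, List, Optional, Set, Tuple
--
-- def _choose_ra_dec_columns(columns: List[str]) -> Tuple[Optional[str], Optional[str]]:
--     """
--     Heuristically select (ra_col, dec_col) from spectra CSV.
--
--     Intended to match columns like "Obj. RA" / "Obj. DEC" or "RA" / "DEC".
--     """
--     ra_col = None
--     dec_col = None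
--     best_ra = -1
--     best_dec = -1
--
--     for col in columns:
--         low = col.lower().strip()
--
--         ra_score = 0
--         if "ra" in low:
--             ra_score += 3
--         if "obj" in low or "object" in low:
--             ra_score += 1
--         if ra_score > best_ra:
--             best_ra = ra_score
--             ra_col = col
--
--         dec_score = 0
--         if "dec" in low:
--             dec_score += 3
--         if "obj" in low or "object" in low:
--             dec_score += 1
--         if dec_score > best_dec:
--             best_dec = dec_score
--             dec_col = col
--
--     if best_ra <= 0 or best_dec <= 0:
--         return None, None
--     return ra_col, dec_col
-- ===== SOURCE B (Python) =====
-- def _choose_ra_dec_columns(columns):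
--     """Tiered first-match search instead of score-keeping: a column with both
--     the key and "obj" beats a key-only column, which beats an "obj"-only one;
--     within a tier the first column wins, matching the strict-improvement loop."""
--
--     def first_with(*subs):
--         for col in columns:
--             low = col.lower().strip()
--             if all(s in low for s in subs):
--                 return col
--         return None
--
--     ra = first_with("ra", "obj") or first_with("ra") or first_with("obj")
--     dec = first_with("dec", "obj") or first_with("dec") or first_with("obj")
--     if ra is None or dec is None:
--         return None, None
--     return ra, dec
-- ===== Notes on version B (the rewrite author's own statement) =====
-- stated objective: alternative
-- what changed: Replaces the single running-best scoring loop (two best-so-far scores and columns updated per iteration) by tiered first-match searches: for each of RA/DEC take the first column containing both the key and 'obj', else the first containing the key, else the first containing 'obj', then the None-guard; the redundant 'object' substring test is dropped since 'obj' subsumes it.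
import Mathlib
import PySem

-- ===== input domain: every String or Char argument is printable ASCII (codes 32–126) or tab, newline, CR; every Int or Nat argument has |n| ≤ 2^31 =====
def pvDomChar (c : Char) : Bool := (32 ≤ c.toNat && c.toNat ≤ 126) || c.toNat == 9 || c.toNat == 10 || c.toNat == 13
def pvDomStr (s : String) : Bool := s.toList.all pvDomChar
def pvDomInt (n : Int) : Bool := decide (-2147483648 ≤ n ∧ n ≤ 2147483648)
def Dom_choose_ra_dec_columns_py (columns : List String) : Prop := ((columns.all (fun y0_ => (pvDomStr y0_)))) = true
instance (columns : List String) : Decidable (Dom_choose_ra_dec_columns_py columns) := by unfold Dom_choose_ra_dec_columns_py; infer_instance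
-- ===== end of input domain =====

-- B replaces A's running-best scoring loop by tiered first-match searches (same cost, different decomposition).


-- ===== PORT A =====
-- the for-loop, carrying (ra_col, dec_col, best_ra, best_dec) exactly as the Python does
def chooseLoopA : List String → Option String → Option String → Int → Int →
    Option String × Option String × Int × Int
  | [], ra_col, dec_col, best_ra, best_dec => (ra_col, dec_col, best_ra, best_dec)
  | col :: rest, ra_col, dec_col, best_ra, best_dec =>
    let low := PySem.Str.strip (PySem.Str.lower col)
    let ra_score : Int := 0
    let ra_score := if PySem.Str.isIn "ra" low then ra_score + 3 else ra_score
    let ra_score := if PySem.Str.isIn "obj" low || PySem.Str.isIn "object" low then ra_score + 1 else ra_score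
    let st1 := if ra_score > best_ra then (ra_score, some col) else (best_ra, ra_col)
    let dec_score : Int := 0
    let dec_score := if PySem.Str.isIn "dec" low then dec_score + 3 else dec_score
    let dec_score := if PySem.Str.isIn "obj" low || PySem.Str.isIn "object" low then dec_score + 1 else dec_score
    let st2 := if dec_score > best_dec then (dec_score, some col) else (best_dec, dec_col)
    chooseLoopA rest st1.2 st2.2 st1.1 st2.1

def choose_ra_dec_columns_py (columns : List String) : Option String × Option String :=
  let st := chooseLoopA columns none none (-1) (-1)
  if st.2.2.1 ≤ 0 || st.2.2.2 ≤ 0 then (none, none) else (st.1, st.2.1)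

-- ===== PORT B =====
-- first_with(*subs): first column whose lowered/stripped form contains every substring
def firstWith (subs : List String) : List String → Option String
  | [] => none
  | col :: rest =>
    if subs.all (fun s => PySem.Str.isIn s (PySem.Str.strip (PySem.Str.lower col)))
    then some col else firstWith subs rest

-- Python's `x or y` here is None-coalescing: first_with only ever returns a column containing a
-- nonempty substring, hence a nonempty (truthy) string; so `or` = Option.orElse exactly.
def choose_ra_dec_columns_py_alt (columns : List String) : Option String × Option String :=
  let ra := ((firstWith ["ra", "obj"] columns).orElse fun _ =>
             (firstWith ["ra"] columns).orElse fun _ => firstWith ["obj"] columns)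
  let dec := ((firstWith ["dec", "obj"] columns).orElse fun _ =>
              (firstWith ["dec"] columns).orElse fun _ => firstWith ["obj"] columns)
  match ra, dec with
  | some r, some d => (some r, some d)
  | _, _ => (none, none)

-- ===== PRECONDITION & SPEC =====
def Spec_choose_ra_dec_columns_py (columns : List String) (out : Option String × Option String) : Prop := out = choose_ra_dec_columns_py_alt columns
instance (columns : List String) (out : Option String × Option String) : Decidable (Spec_choose_ra_dec_columns_py columns out) := by unfold Spec_choose_ra_dec_columns_py; infer_instance

-- ===== CLAIM (what is proved, stated in full; the proofs are below) =====
def Claim_equal_choose_ra_dec_columns_py : Prop := ∀ (columns : List String), Dom_choose_ra_dec_columns_py columns → Spec_choose_ra_dec_columns_py columns (choose_ra_dec_columns_py columns)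

-- ===== LEMMAS AND PROOFS =====

-- abstract versions of the two sides, generic in the key predicate p and the "obj" predicate o
def pvScore (p o : String → Bool) (c : String) : Int :=
  (if p c then 3 else 0) + (if o c then 1 else 0)

def pvFold (p o : String → Bool) : List String → Option String → Int → Option String × Int
  | [], rc, b => (rc, b)
  | c :: cs, rc, b =>
    pvFold p o cs (if pvScore p o c > b then some c else rc) (max b (pvScore p o c))

def pvMx (p o : String → Bool) : List String → Int
  | [] => -1
  | c :: cs => max (pvScore p o c) (pvMx p o cs)

def pvFw (q : String → Bool) : List String → Option String
  | [] => none
  | c :: cs => if q c then some c else pvFw q cs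

def pvChain (p o : String → Bool) (cols : List String) : Option String :=
  (pvFw (fun c => p c && o c) cols).orElse fun _ =>
    (pvFw p cols).orElse fun _ => pvFw o cols

def pvKey (k : String) (c : String) : Bool :=
  PySem.Str.isIn k (PySem.Str.strip (PySem.Str.lower c))

lemma obj_of_object (l : String) (h : PySem.Str.isIn "object" l = true) :
    PySem.Str.isIn "obj" l = true := by
  rw [PySem.Str.isIn_iff_infix] at h ⊢
  exact List.IsInfix.trans (by decide) h

lemma obj_or_object (l : String) :
    (PySem.Str.isIn "obj" l || PySem.Str.isIn "object" l) = PySem.Str.isIn "obj" l := by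
  cases hob : PySem.Str.isIn "object" l
  · simp
  · rw [obj_of_object l hob]; rfl

-- A's loop splits into two independent generic folds
lemma chooseLoopA_eq_folds (cols : List String) :
    ∀ (rc dc : Option String) (bra bdec : Int),
    chooseLoopA cols rc dc bra bdec =
      ((pvFold (pvKey "ra") (pvKey "obj") cols rc bra).1,
       (pvFold (pvKey "dec") (pvKey "obj") cols dc bdec).1,
       (pvFold (pvKey "ra") (pvKey "obj") cols rc bra).2,
       (pvFold (pvKey "dec") (pvKey "obj") cols dc bdec).2) := by
  induction cols with
  | nil => intro rc dc bra bdec; rfl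
  | cons c cs ih =>
    intro rc dc bra bdec
    have hscore : ∀ (k : String),
        (if PySem.Str.isIn "obj" (PySem.Str.strip (PySem.Str.lower c)) then
           (if PySem.Str.isIn k (PySem.Str.strip (PySem.Str.lower c)) then (0:Int) + 3 else 0) + 1
         else if PySem.Str.isIn k (PySem.Str.strip (PySem.Str.lower c)) then (0:Int) + 3 else 0) =
        pvScore (pvKey k) (pvKey "obj") c := by
      intro k
      simp only [pvScore, pvKey]
      split_ifs <;> omega
    have hsplit : ∀ (s bb : Int) (r : Option String),
        (if s > bb then (s, some c) else (bb, r)) = (max bb s, if s > bb then some c else r) := by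
      intro s bb r
      split_ifs with h <;> rw [Prod.mk.injEq] <;> exact ⟨by omega, rfl⟩
    simp only [chooseLoopA, obj_or_object]
    rw [hscore "ra", hscore "dec", hsplit, hsplit]
    dsimp only
    rw [ih]
    simp only [pvFold]

lemma pvScore_nonneg (p o : String → Bool) (c : String) : 0 ≤ pvScore p o c := by
  unfold pvScore; split_ifs <;> omega

lemma neg_one_le_pvMx (p o : String → Bool) (cols : List String) : -1 ≤ pvMx p o cols := by
  cases cols with
  | nil => simp [pvMx]
  | cons c cs =>
    have := pvScore_nonneg p o c
    simp only [pvMx]; omega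

lemma le_pvMx (p o : String → Bool) {c : String} {cols : List String} (h : c ∈ cols) :
    pvScore p o c ≤ pvMx p o cols := by
  induction cols with
  | nil => cases h
  | cons d ds ih =>
    rcases List.mem_cons.mp h with h | h
    · subst h; simp only [pvMx]; omega
    · have := ih h; simp only [pvMx]; omega

lemma pvMx_attained (p o : String → Bool) (cols : List String) (h : -1 < pvMx p o cols) :
    ∃ c ∈ cols, pvScore p o c = pvMx p o cols := by
  induction cols with
  | nil => simp [pvMx] at h
  | cons c cs ih =>
    simp only [pvMx] at h ⊢
    by_cases hle : pvMx p o cs ≤ pvScore p o c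
    · exact ⟨c, List.mem_cons_self, by omega⟩
    · have ⟨d, hd, hs⟩ := ih (by omega)
      exact ⟨d, List.mem_cons_of_mem _ hd, by omega⟩

-- characterization of the strict-improvement fold: final best is the max score,
-- final column the first one attaining it (if it beats the initial best)
lemma pvFold_char (p o : String → Bool) (cols : List String) :
    ∀ (b : Int), -1 ≤ b → ∀ (rc : Option String),
    pvFold p o cols rc b =
      ((if pvMx p o cols > b then pvFw (fun c => pvScore p o c == pvMx p o cols) cols else rc),
       max b (pvMx p o cols)) := by
  induction cols with
  | nil =>
    intro b hb rc
    simp only [pvFold, pvMx]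
    rw [if_neg (by omega), max_eq_left (by omega)]
  | cons c cs ih =>
    intro b hb rc
    have hs := pvScore_nonneg p o c
    have hmx := neg_one_le_pvMx p o cs
    simp only [pvFold, pvMx, pvFw]
    rw [ih (max b (pvScore p o c)) (by omega)]
    by_cases h1 : pvMx p o cs > max b (pvScore p o c)
    · have hmax : max (pvScore p o c) (pvMx p o cs) = pvMx p o cs := by omega
      rw [if_pos h1, hmax, if_pos (by omega)]
      have hne : (pvScore p o c == pvMx p o cs) = false := by
        simp only [beq_eq_false_iff_ne]; omega
      rw [hne, if_neg (by simp), Prod.mk.injEq]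
      exact ⟨rfl, by omega⟩
    · by_cases h2 : pvScore p o c > b
      · have hmax : max (pvScore p o c) (pvMx p o cs) = pvScore p o c := by omega
        rw [if_neg h1, if_pos h2, hmax, if_pos (by omega),
            if_pos (by simp), Prod.mk.injEq]
        exact ⟨rfl, by omega⟩
      · have hmax : max (pvScore p o c) (pvMx p o cs) ≤ b := by omega
        rw [if_neg h1, if_neg (by omega), if_neg (by omega), Prod.mk.injEq]
        exact ⟨rfl, by omega⟩

lemma pvFw_ext_mem {q q' : String → Bool} {cols : List String}
    (h : ∀ c ∈ cols, q c = q' c) : pvFw q cols = pvFw q' cols := by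
  induction cols with
  | nil => rfl
  | cons c cs ih =>
    simp only [pvFw]
    rw [h c List.mem_cons_self, ih (fun d hd => h d (List.mem_cons_of_mem _ hd))]

lemma pvFw_none {q : String → Bool} {cols : List String}
    (h : ∀ c ∈ cols, q c = false) : pvFw q cols = none := by
  induction cols with
  | nil => rfl
  | cons c cs ih =>
    simp only [pvFw, h c List.mem_cons_self]
    exact ih (fun d hd => h d (List.mem_cons_of_mem _ hd))

lemma pvFw_isSome {q : String → Bool} {cols : List String}
    (h : ∃ c ∈ cols, q c = true) : (pvFw q cols).isSome := by
  induction cols with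
  | nil => simp at h
  | cons c cs ih =>
    simp only [pvFw]
    by_cases hc : q c
    · simp [hc]
    · rcases h with ⟨d, hd, hq⟩
      rcases List.mem_cons.mp hd with h | h
      · subst h; simp [hq] at hc
      · simp only [hc]; simpa using ih ⟨d, h, hq⟩

lemma orElse_of_isSome {α : Type} {a : Option α} (f : Unit → Option α) (h : a.isSome) :
    (a.orElse f) = a := by
  rcases Option.isSome_iff_exists.mp h with ⟨x, hx⟩
  rw [hx]; rfl

-- the tiered chain equals the first-max search when the max score is positive
lemma pvChain_eq_fm (p o : String → Bool) (cols : List String) (h : 1 ≤ pvMx p o cols) :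
    pvChain p o cols = pvFw (fun c => pvScore p o c == pvMx p o cols) cols := by
  obtain ⟨c0, hc0, hs0⟩ := pvMx_attained p o cols (by omega)
  unfold pvScore at hs0
  unfold pvChain
  cases hp0 : p c0 <;> cases ho0 : o c0 <;> rw [hp0, ho0] at hs0 <;> simp at hs0
  -- case p c0 = false, o c0 = false : pvMx = 0, contradicts h
  · exfalso; omega
  -- case p c0 = false, o c0 = true : pvMx = 1, no column has p
  · have hnop : ∀ c ∈ cols, p c = false := by
      intro c hc
      cases hpc : p c
      · rfl
      · exfalso
        have := le_pvMx p o hc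
        unfold pvScore at this
        rw [hpc] at this
        simp at this
        split_ifs at this <;> omega
    rw [pvFw_none (q := fun c => p c && o c) (fun c hc => by simp [hnop c hc]),
        pvFw_none (q := p) hnop]
    show pvFw o cols = _
    refine pvFw_ext_mem fun c hc => ?_
    unfold pvScore
    rw [hnop c hc, ← hs0]
    cases hoc : o c <;> decide
  -- case p c0 = true, o c0 = false : pvMx = 3, no column has both
  · have hno4 : ∀ c ∈ cols, (p c && o c) = false := by
      intro c hc
      cases hpc : p c <;> cases hoc : o c <;> simp
      exfalso
      have := le_pvMx p o hc
      unfold pvScore at this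
      rw [hpc, hoc] at this
      simp at this
      omega
    rw [pvFw_none hno4]
    show (pvFw p cols).orElse _ = _
    have hsome : (pvFw p cols).isSome := pvFw_isSome ⟨c0, hc0, hp0⟩
    rw [orElse_of_isSome _ hsome]
    refine pvFw_ext_mem fun c hc => ?_
    have h4 := hno4 c hc
    unfold pvScore
    rw [← hs0]
    cases hpc : p c <;> cases hoc : o c
    · decide
    · decide
    · decide
    · exact absurd h4 (by rw [hpc, hoc]; decide)
  -- case p c0 = true, o c0 = true : pvMx = 4, first column with both wins
  · have hsome : (pvFw (fun c => p c && o c) cols).isSome :=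
      pvFw_isSome ⟨c0, hc0, by simp [hp0, ho0]⟩
    rw [orElse_of_isSome _ hsome]
    refine pvFw_ext_mem fun c hc => ?_
    unfold pvScore
    rw [← hs0]
    cases hpc : p c <;> cases hoc : o c <;> decide

lemma pvChain_none (p o : String → Bool) (cols : List String) (h : pvMx p o cols ≤ 0) :
    pvChain p o cols = none := by
  have hno : ∀ c ∈ cols, (p c = false) ∧ (o c = false) := by
    intro c hc
    have hle := le_pvMx p o hc
    unfold pvScore at hle
    constructor
    · cases hp : p c
      · rfl
      · exfalso; rw [hp] at hle; simp at hle
        split_ifs at hle <;> omega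
    · cases ho : o c
      · rfl
      · exfalso; rw [ho] at hle; simp at hle
        split_ifs at hle <;> omega
  unfold pvChain
  rw [pvFw_none (q := fun c => p c && o c) (fun c hc => by simp [(hno c hc).1]),
      pvFw_none (q := p) (fun c hc => (hno c hc).1),
      pvFw_none (q := o) (fun c hc => (hno c hc).2)]
  rfl

lemma firstWith_eq_fw (subs : List String) (cols : List String) :
    firstWith subs cols =
      pvFw (fun col => subs.all (fun s => PySem.Str.isIn s (PySem.Str.strip (PySem.Str.lower col)))) cols := by
  induction cols with
  | nil => rfl
  | cons c cs ih => simp only [firstWith, pvFw, ih]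

-- B's port in terms of the abstract chain
lemma alt_eq_chain (columns : List String) :
    choose_ra_dec_columns_py_alt columns =
      (match pvChain (pvKey "ra") (pvKey "obj") columns, pvChain (pvKey "dec") (pvKey "obj") columns with
       | some r, some d => (some r, some d)
       | _, _ => (none, none)) := by
  have e1 : pvFw (fun col => (["ra", "obj"]).all fun s => PySem.Str.isIn s (PySem.Str.strip (PySem.Str.lower col))) columns
      = pvFw (fun c => pvKey "ra" c && pvKey "obj" c) columns :=
    pvFw_ext_mem (fun c _ => by simp [pvKey])
  have e2 : pvFw (fun col => (["ra"]).all fun s => PySem.Str.isIn s (PySem.Str.strip (PySem.Str.lower col))) columns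
      = pvFw (pvKey "ra") columns :=
    pvFw_ext_mem (fun c _ => by simp [pvKey])
  have e3 : pvFw (fun col => (["obj"]).all fun s => PySem.Str.isIn s (PySem.Str.strip (PySem.Str.lower col))) columns
      = pvFw (pvKey "obj") columns :=
    pvFw_ext_mem (fun c _ => by simp [pvKey])
  have e4 : pvFw (fun col => (["dec", "obj"]).all fun s => PySem.Str.isIn s (PySem.Str.strip (PySem.Str.lower col))) columns
      = pvFw (fun c => pvKey "dec" c && pvKey "obj" c) columns :=
    pvFw_ext_mem (fun c _ => by simp [pvKey])
  have e5 : pvFw (fun col => (["dec"]).all fun s => PySem.Str.isIn s (PySem.Str.strip (PySem.Str.lower col))) columns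
      = pvFw (pvKey "dec") columns :=
    pvFw_ext_mem (fun c _ => by simp [pvKey])
  simp only [choose_ra_dec_columns_py_alt, pvChain, firstWith_eq_fw, e1, e2, e3, e4, e5]

-- ===== VERDICT (by name: the statement is the Claim_ definition above) =====
theorem choose_ra_dec_columns_py_spec : Claim_equal_choose_ra_dec_columns_py := by
  intro columns _
  unfold Spec_choose_ra_dec_columns_py
  rw [alt_eq_chain]
  unfold choose_ra_dec_columns_py
  rw [chooseLoopA_eq_folds,
      pvFold_char (pvKey "ra") (pvKey "obj") columns (-1) (by omega) none,
      pvFold_char (pvKey "dec") (pvKey "obj") columns (-1) (by omega) none]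
  have hra := neg_one_le_pvMx (pvKey "ra") (pvKey "obj") columns
  have hdec := neg_one_le_pvMx (pvKey "dec") (pvKey "obj") columns
  dsimp only
  rw [max_eq_right hra, max_eq_right hdec]
  by_cases hA : pvMx (pvKey "ra") (pvKey "obj") columns ≤ 0
  · rw [pvChain_none _ _ _ hA, if_pos (by simp [hA])]
  · by_cases hD : pvMx (pvKey "dec") (pvKey "obj") columns ≤ 0
    · rw [pvChain_none _ _ _ hD, if_pos (by simp [hD])]
      cases pvChain (pvKey "ra") (pvKey "obj") columns <;> rfl
    · rw [pvChain_eq_fm _ _ _ (by omega), pvChain_eq_fm _ _ _ (by omega),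
          if_neg (by simp; omega), if_pos (by omega), if_pos (by omega)]
      obtain ⟨x, hx⟩ := Option.isSome_iff_exists.mp
        (pvFw_isSome (q := fun c => pvScore (pvKey "ra") (pvKey "obj") c == pvMx (pvKey "ra") (pvKey "obj") columns)
          (by obtain ⟨c0, hc0, hs0⟩ := pvMx_attained (pvKey "ra") (pvKey "obj") columns (by omega)
              exact ⟨c0, hc0, by simp [hs0]⟩))
      obtain ⟨y, hy⟩ := Option.isSome_iff_exists.mp
        (pvFw_isSome (q := fun c => pvScore (pvKey "dec") (pvKey "obj") c == pvMx (pvKey "dec") (pvKey "obj") columns)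
          (by obtain ⟨c0, hc0, hs0⟩ := pvMx_attained (pvKey "dec") (pvKey "obj") columns (by omega)
              exact ⟨c0, hc0, by simp [hs0]⟩))
      rw [hx, hy]
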